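-- pv_equiv track=rewrite | github.com/Radcliffe/OEIS-Python | src/oeispy/A383/A383977.py | a_first
-- ===== SOURCE A (Python) =====
-- def fib(n):
--   return n if n < 2 else fib(n - 1) + fib(n - 2)
--
-- def a_first(n):
--   # returns an array of the first n terms
--   if n == 0: return []
--   f = []
--   i = 1
--   while True:
--     for j in range(fib(i) - 1):
--       f.append(f[j] + fib(i + 1))
--       if len(f) == n: return f
--     f.append(fib(i + 1))
--     if len(f) == n: return f
--     i += 1
-- ===== SOURCE B (Python) =====
-- def a_first(n):
--     # iterative Fibonacci + build whole blocks, truncate at the end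
--     f = []
--     a, b = 1, 1  # fib(i), fib(i+1)
--     while len(f) < n:
--         f = f + [f[j] + b for j in range(a - 1)] + [b]
--         a, b = b, a + b
--     return f[:n]
-- ===== Notes on version B (the rewrite author's own statement) =====
-- stated objective: faster
-- what changed: B replaces A's exponentially-recursive fib with an iterated (a,b) Fibonacci pair carried through the loop, and builds each whole block then truncates with f[:n] instead of A's per-append early-return length checks.
import Mathlib
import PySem

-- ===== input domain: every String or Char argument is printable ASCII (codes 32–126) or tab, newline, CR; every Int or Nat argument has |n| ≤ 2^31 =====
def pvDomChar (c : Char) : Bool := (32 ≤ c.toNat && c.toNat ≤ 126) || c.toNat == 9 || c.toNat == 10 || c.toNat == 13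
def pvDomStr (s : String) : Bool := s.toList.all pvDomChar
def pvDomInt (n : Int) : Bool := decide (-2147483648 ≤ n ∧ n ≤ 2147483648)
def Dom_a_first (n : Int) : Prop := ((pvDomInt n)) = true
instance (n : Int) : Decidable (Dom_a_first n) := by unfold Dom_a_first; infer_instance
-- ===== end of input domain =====

-- B replaces A's exponential recursive fib by an iterated Fibonacci pair and builds
-- whole blocks then truncates, instead of A's per-append early-return checks (faster).

-- ===== PORT A =====
-- fib(n): naive double recursion, literal
def fibA (n : Int) : Int :=
  if n < 2 then n else fibA (n - 1) + fibA (n - 2)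
termination_by n.toNat
decreasing_by all_goals omega

-- inner 'for j in range(fib(i)-1)' loop with its early return (Bool = returned).
-- f[j] is always in range here (proved below), so pyGetD is exact.
def innerA (n c : Int) (f : List Int) : List Int → List Int × Bool
  | [] => (f, false)
  | j :: js =>
      let f' := f ++ [PySem.List.pyGetD f j 0 + c]
      if (f'.length : Int) == n then (f', true) else innerA n c f' js

-- 'while True' loop; fuel makes it total (each iteration appends ≥ 1 element, so
-- n.toNat iterations always suffice for the Python run; fuel is only a totality guard).
def loopA (n : Int) (f : List Int) (i : Int) : Nat → List Int
  | 0 => f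
  | fuel + 1 =>
      match innerA n (fibA (i + 1)) f (PySem.List.pyRange 0 (fibA i - 1) 1) with
      | (f', true) => f'
      | (f', false) =>
          let f'' := f' ++ [fibA (i + 1)]
          if (f''.length : Int) == n then f'' else loopA n f'' (i + 1) fuel

def a_first (n : Int) : List Int :=
  if n == 0 then [] else loopA n [] 1 n.toNat

-- ===== PORT B =====
-- 'while len(f) < n' loop of Source B; same fuel-as-totality-guard device.
def loopB (n : Int) (f : List Int) (a b : Int) : Nat → List Int
  | 0 => f
  | fuel + 1 =>
      if (f.length : Int) < n then
        loopB n (f ++ (PySem.List.pyRange 0 (a - 1) 1).map (fun j => PySem.List.pyGetD f j 0 + b) ++ [b]) b (a + b) fuel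
      else f

def a_first_alt (n : Int) : List Int :=
  PySem.List.slice (loopB n [] 1 1 n.toNat) none (some n)

-- ===== PRECONDITION & SPEC =====
-- A never returns on negative input (the while loop runs forever); Pre_ excludes exactly the negatives.
def Pre_a_first (n : Int) : Prop := 0 ≤ n
instance (n : Int) : Decidable (Pre_a_first n) := by unfold Pre_a_first; infer_instance
def pvWitness_a_first : Int := (7)

def Spec_a_first (n : Int) (out : List Int) : Prop := out = a_first_alt n
instance (n : Int) (out : List Int) : Decidable (Spec_a_first n out) := by unfold Spec_a_first; infer_instance

-- ===== CLAIM (what is proved, stated in full; the proofs are below) =====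
def Claim_equal_a_first : Prop := ∀ (n : Int), Dom_a_first n → Pre_a_first n → Spec_a_first n (a_first n)

-- ===== LEMMAS AND PROOFS =====

lemma fibA_zero : fibA 0 = 0 := by unfold fibA; norm_num
lemma fibA_one : fibA 1 = 1 := by unfold fibA; norm_num
lemma fibA_two : fibA 2 = 1 := by unfold fibA; norm_num [fibA_one, fibA_zero]
lemma fibA_rec (i : Int) (h : 2 ≤ i) : fibA i = fibA (i - 1) + fibA (i - 2) := by
  rw [fibA]; simp [show ¬ i < 2 by omega]

lemma fibA_nonneg_nat : ∀ k : Nat, 0 ≤ fibA (k : Int) := by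
  intro k
  induction k using Nat.strong_induction_on with
  | _ k ih =>
    match k with
    | 0 => simp [fibA_zero]
    | 1 => simp [fibA_one]
    | (m + 2) =>
      rw [fibA_rec _ (by push_cast; omega)]
      have h1 := ih (m + 1) (by omega)
      have h2 := ih m (by omega)
      have e1 : ((m + 2 : Nat) : Int) - 1 = ((m + 1 : Nat) : Int) := by push_cast; ring
      have e2 : ((m + 2 : Nat) : Int) - 2 = ((m : Nat) : Int) := by push_cast; ring
      rw [e1, e2]; omega

lemma fibA_nonneg (i : Int) (h : 0 ≤ i) : 0 ≤ fibA i := by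
  have := fibA_nonneg_nat i.toNat
  rwa [Int.toNat_of_nonneg h] at this

lemma fibA_pos_nat : ∀ k : Nat, 1 ≤ fibA ((k : Int) + 1) := by
  intro k
  induction k using Nat.strong_induction_on with
  | _ k ih =>
    match k with
    | 0 => simp [fibA_one]
    | 1 => norm_num [fibA_two]
    | (m + 2) =>
      rw [fibA_rec _ (by push_cast; omega)]
      have h1 := ih (m + 1) (by omega)
      have h2 := fibA_nonneg_nat (m + 1)
      have e1 : ((m + 2 : Nat) : Int) + 1 - 1 = ((m + 1 : Nat) : Int) + 1 := by push_cast; ring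
      have e2 : ((m + 2 : Nat) : Int) + 1 - 2 = ((m + 1 : Nat) : Int) := by push_cast; ring
      rw [e1, e2]; omega

lemma fibA_pos (i : Int) (h : 1 ≤ i) : 1 ≤ fibA i := by
  have := fibA_pos_nat (i - 1).toNat
  rwa [Int.toNat_of_nonneg (by omega : (0:Int) ≤ i - 1), sub_add_cancel] at this

lemma fibA_mono (i : Int) (h : 1 ≤ i) : fibA i ≤ fibA (i + 1) := by
  rw [fibA_rec (i + 1) (by omega), show i + 1 - 1 = i from by ring,
    show i + 1 - 2 = i - 1 from by ring]
  have := fibA_nonneg (i - 1) (by omega)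
  omega

-- inner loop = append the whole mapped block, truncated at n with the early-return flag
lemma innerA_eq (n c : Int) (f : List Int) (js : List Int)
    (hjs : ∀ j ∈ js, 0 ≤ j ∧ j.toNat < f.length)
    (hlt : (f.length : Int) < n) :
    innerA n c f js =
      (if ((f.length + js.length : Int)) < n
       then (f ++ js.map (fun j => PySem.List.pyGetD f j 0 + c), false)
       else ((f ++ js.map (fun j => PySem.List.pyGetD f j 0 + c)).take n.toNat, true)) := by
  induction js generalizing f with
  | nil =>
    simp only [innerA, List.map_nil, List.append_nil, List.length_nil]
    rw [if_pos (by push_cast; omega)]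
  | cons j js ih =>
    obtain ⟨hj0, hjlt⟩ := hjs j (List.mem_cons_self)
    simp only [innerA]
    set v := PySem.List.pyGetD f j 0 + c with hv
    by_cases he : (f.length : Int) + 1 = n
    · rw [if_pos (by simp; omega)]
      rw [if_neg (by simp; omega)]
      have hx : (f ++ (j :: js).map (fun x => PySem.List.pyGetD f x 0 + c))
          = (f ++ [v]) ++ js.map (fun x => PySem.List.pyGetD f x 0 + c) := by
        simp [hv]
      rw [hx, show n.toNat = (f ++ [v]).length from by simp; omega, List.take_left]
    · rw [if_neg (by simp; omega)]
      have hjs' : ∀ x ∈ js, 0 ≤ x ∧ x.toNat < (f ++ [v]).length := by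
        intro x hx
        obtain ⟨h1, h2⟩ := hjs x (List.mem_cons_of_mem _ hx)
        simp; omega
      rw [ih (f ++ [v]) hjs' (by simp; omega)]
      have hmap : js.map (fun x => PySem.List.pyGetD (f ++ [v]) x 0 + c)
          = js.map (fun x => PySem.List.pyGetD f x 0 + c) := by
        apply List.map_congr_left
        intro x hx
        obtain ⟨h1, h2⟩ := hjs x (List.mem_cons_of_mem _ hx)
        rw [PySem.List.pyGetD_eq_getElem _ _ h1 (by simp; omega),
          PySem.List.pyGetD_eq_getElem _ _ h1 (by omega)]
        rw [List.getElem_append_left h2]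
      rw [hmap]
      have hx : (f ++ [v]) ++ js.map (fun x => PySem.List.pyGetD f x 0 + c)
          = f ++ (j :: js).map (fun x => PySem.List.pyGetD f x 0 + c) := by
        simp [hv]
      rw [hx]
      exact if_congr (by simp; omega) rfl rfl

-- main bridge: A's loop equals B's loop truncated to n, under the length invariant
lemma loopB_stop (n : Int) (f : List Int) (a b : Int) (fuel : Nat)
    (h : ¬ (f.length : Int) < n) : loopB n f a b fuel = f := by
  cases fuel <;> simp [loopB, h]

lemma loopAB (fuel : Nat) : ∀ (n i : Int) (f : List Int), 1 ≤ i →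
    (f.length : Int) < n → (f.length : Int) = fibA (i + 1) - 1 →
    loopA n f i fuel = (loopB n f (fibA i) (fibA (i + 1)) fuel).take n.toNat := by
  induction fuel with
  | zero =>
    intro n i f hi hlt hinv
    simp only [loopA, loopB]
    rw [List.take_of_length_le (by omega)]
  | succ fuel ih =>
    intro n i f hi hlt hinv
    have hposa : 1 ≤ fibA i := fibA_pos i hi
    have hmono : fibA i ≤ fibA (i + 1) := fibA_mono i hi
    have hjs : ∀ j ∈ PySem.List.pyRange 0 (fibA i - 1) 1, 0 ≤ j ∧ j.toNat < f.length := by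
      intro j hj
      rw [PySem.List.mem_pyRange_one] at hj
      omega
    have hrec : fibA (i + 1 + 1) = fibA i + fibA (i + 1) := by
      rw [fibA_rec (i + 1 + 1) (by omega), show i + 1 + 1 - 1 = i + 1 from by ring,
        show i + 1 + 1 - 2 = i from by ring]
      ring
    have hlenjs : (((PySem.List.pyRange 0 (fibA i - 1) 1).length : Nat) : Int) = fibA i - 1 := by
      rw [PySem.List.length_pyRange_one]; omega
    simp only [loopA, loopB]
    rw [innerA_eq n (fibA (i + 1)) f _ hjs hlt, if_pos hlt]
    set blk := (PySem.List.pyRange 0 (fibA i - 1) 1).map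
      (fun j => PySem.List.pyGetD f j 0 + fibA (i + 1)) with hblk
    have hblklen : ((blk.length : Nat) : Int) = fibA i - 1 := by
      rw [hblk, List.length_map]; exact hlenjs
    have hel : (((f ++ blk ++ [fibA (i + 1)]).length : Nat) : Int)
        = (f.length : Int) + ((blk.length : Nat) : Int) + 1 := by
      simp only [List.length_append, List.length_cons, List.length_nil]
      push_cast
      ring
    by_cases hcase : (f.length : Int) + (PySem.List.pyRange 0 (fibA i - 1) 1).length < n
    · rw [if_pos hcase]
      simp only []
      have hextlen : (((f ++ blk ++ [fibA (i + 1)]).length : Nat) : Int) = fibA (i + 1 + 1) - 1 := by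
        omega
      by_cases hend : (((f ++ blk ++ [fibA (i + 1)]).length : Nat) : Int) = n
      · rw [if_pos (by simpa using hend)]
        rw [loopB_stop n _ _ _ fuel (by omega)]
        rw [List.take_of_length_le (by omega)]
      · rw [if_neg (by simpa using hend)]
        rw [show fibA i + fibA (i + 1) = fibA (i + 1 + 1) from by omega]
        exact ih n (i + 1) (f ++ blk ++ [fibA (i + 1)]) (by omega) (by omega) hextlen
    · rw [if_neg hcase]
      simp only []
      rw [loopB_stop n _ _ _ fuel (by omega)]
      rw [List.take_append_of_le_length (show n.toNat ≤ (f ++ blk).length from by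
        simp only [List.length_append]; omega)]

-- ===== VERDICT (by name: the statement is the Claim_ definition above) =====
theorem a_first_spec : Claim_equal_a_first := by
  intro n _ hpre
  unfold Spec_a_first a_first a_first_alt
  by_cases h0 : n = 0
  · subst h0; rw [PySem.List.slice_to _ (le_refl (0:Int))]; simp [loopB]
  · have h1 : (1:Int) ≤ n := by unfold Pre_a_first at hpre; omega
    rw [if_neg (by simpa using h0)]
    rw [PySem.List.slice_to _ (by omega : (0:Int) ≤ n)]
    have := loopAB n.toNat n 1 [] (by omega) (by simpa using h1)
      (by norm_num [fibA_two])
    rw [fibA_one, show (1:Int)+1 = 2 from rfl, fibA_two] at this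
    exact this
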